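-- pv_equiv track=rewrite | github.com/jkgriebel93/griddy-sdk-python | scripts/generate_model_inits.py | build_type_checking_imports
-- ===== SOURCE A (Python) =====
-- from collections import defaultdict
--
-- LINE_LENGTH = 88
--
-- def _isort_key(name: str) -> str:
--     """Match isort's default sorting: lowercase, with leading underscores last."""
--     return name.lower()
--
-- def build_type_checking_imports(symbol_map: dict[str, str], package_base: str) -> str:
--     """Build the TYPE_CHECKING import block matching isort's formatting."""
--     module_to_symbols: dict[str, list[str]] = defaultdict(list)
--     for symbol, rel_module in symbol_map.items():
--         abs_module = f"{package_base}{rel_module}"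
--         module_to_symbols[abs_module].append(symbol)
--
--     lines = []
--     lines.append("if TYPE_CHECKING:")
--     for module in sorted(module_to_symbols):
--         symbols = sorted(module_to_symbols[module], key=_isort_key)
--         if len(symbols) == 1:
--             single_line = f"    from {module} import {symbols[0]}"
--             if len(single_line) <= LINE_LENGTH:
--                 lines.append(single_line)
--             else:
--                 lines.append(f"    from {module} import (")
--                 lines.append(f"        {symbols[0]},")
--                 lines.append("    )")
--         else:
--             lines.append(f"    from {module} import (")
--             for sym in symbols:
--                 lines.append(f"        {sym},")
--             lines.append("    )")
--     return "\n".join(lines)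
-- ===== SOURCE B (Python) =====
-- LINE_LENGTH = 88
--
--
-- def _emit(module, syms):
--     match syms:
--         case [s]:
--             line = f"    from {module} import {s}"
--             if len(line) <= LINE_LENGTH:
--                 return [line]
--             return [f"    from {module} import (", f"        {s},", "    )"]
--         case _:
--             return [f"    from {module} import ("] + [f"        {s}," for s in syms] + ["    )"]
--
--
-- def build_type_checking_imports(symbol_map: dict[str, str], package_base: str) -> str:
--     """Build the TYPE_CHECKING import block matching isort's formatting."""
--     pairs = [(package_base + rel, sym) for sym, rel in symbol_map.items()]
--     out = ["if TYPE_CHECKING:"]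
--     for module in sorted({m for m, _ in pairs}):
--         out += _emit(module, sorted([s for m, s in pairs if m == module], key=str.lower))
--     return "\n".join(out)
-- ===== Notes on version B (the rewrite author's own statement) =====
-- stated objective: alternative
-- what changed: Replaces A's defaultdict grouping, per-module dict lookups and accumulator-append loop with a single sorted deduplicated module list, a per-module filter of the (module, symbol) pair list, and a pure helper that emits each import block, concatenated with one flatMap-style pass.
import Mathlib
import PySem

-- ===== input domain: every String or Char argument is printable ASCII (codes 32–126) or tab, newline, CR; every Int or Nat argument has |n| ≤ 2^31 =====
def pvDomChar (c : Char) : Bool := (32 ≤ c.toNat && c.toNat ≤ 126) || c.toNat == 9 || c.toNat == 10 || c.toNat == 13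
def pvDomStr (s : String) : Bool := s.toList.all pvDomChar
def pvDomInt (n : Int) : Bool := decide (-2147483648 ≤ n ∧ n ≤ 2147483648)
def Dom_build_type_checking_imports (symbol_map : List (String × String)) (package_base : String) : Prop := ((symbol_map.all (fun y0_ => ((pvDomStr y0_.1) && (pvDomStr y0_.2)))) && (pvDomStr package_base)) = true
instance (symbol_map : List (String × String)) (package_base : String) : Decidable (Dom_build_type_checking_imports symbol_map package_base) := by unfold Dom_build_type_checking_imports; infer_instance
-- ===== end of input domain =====

-- B: instead of A's defaultdict grouping + per-module dict lookups and an accumulator fold,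
-- B sorts the deduplicated module list once and, per module, filters the pair list and emits
-- each import block with a pure helper (objective: alternative decomposition, same output).

-- ===== PORT A =====
-- The Python argument is a dict; the assoc list is turned into the dict with Dict.ofList
-- (duplicate keys: last value wins, first position kept), then A's loops are transliterated.
def build_type_checking_imports (symbol_map : List (String × String)) (package_base : String) : String :=
  let items := (PySem.Dict.ofList symbol_map).items
  -- module_to_symbols: defaultdict(list); for symbol, rel_module in symbol_map.items(): …append(symbol)
  let m := items.foldl
    (fun d p => d.modify (package_base ++ p.2) [] (fun old => old ++ [p.1])) PySem.Dict.empty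
  let lines := (PySem.List.sorted m.keys (fun x => x) false).foldl
    (fun lines module =>
      let symbols := PySem.List.sorted (m.getD module []) (fun s => PySem.Str.lower s) false
      if symbols.length == 1 then
        let single := "    from " ++ module ++ " import " ++ PySem.List.pyGetD symbols 0 ""
        if PySem.Str.len single ≤ 88 then
          lines ++ [single]
        else
          lines ++ ["    from " ++ module ++ " import ("]
                ++ ["        " ++ PySem.List.pyGetD symbols 0 "" ++ ","] ++ ["    )"]
      else
        (symbols.foldl (fun l s => l ++ ["        " ++ s ++ ","])
          (lines ++ ["    from " ++ module ++ " import ("])) ++ ["    )"])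
    ["if TYPE_CHECKING:"]
  PySem.Str.join "\n" lines

-- ===== PORT B =====
-- helper _emit of Source B (Python 'match syms: case [s] | case _' is the Lean match below)
def pvEmitGroup (module : String) (syms : List String) : List String :=
  match syms with
  | [s] =>
    let line := "    from " ++ module ++ " import " ++ s
    if PySem.Str.len line ≤ 88 then [line]
    else ["    from " ++ module ++ " import (", "        " ++ s ++ ",", "    )"]
  | _ => ("    from " ++ module ++ " import (") :: (syms.map (fun s => "        " ++ s ++ ",") ++ ["    )"])

def build_type_checking_imports_alt (symbol_map : List (String × String)) (package_base : String) : String :=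
  let pairs := (PySem.Dict.ofList symbol_map).items.map (fun p => (package_base ++ p.2, p.1))
  let body := (PySem.List.sorted (PySem.Set.ofList (pairs.map (fun q => q.1))) (fun x => x) false).flatMap
    (fun module =>
      pvEmitGroup module
        (PySem.List.sorted ((pairs.filter (fun q => q.1 == module)).map (fun q => q.2))
          (fun s => PySem.Str.lower s) false))
  PySem.Str.join "\n" ("if TYPE_CHECKING:" :: body)

-- ===== PRECONDITION & SPEC =====
def Spec_build_type_checking_imports (symbol_map : List (String × String)) (package_base : String) (out : String) : Prop := out = build_type_checking_imports_alt symbol_map package_base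
instance (symbol_map : List (String × String)) (package_base : String) (out : String) : Decidable (Spec_build_type_checking_imports symbol_map package_base out) := by unfold Spec_build_type_checking_imports; infer_instance

-- ===== CLAIM (what is proved, stated in full; the proofs are below) =====
def Claim_equal_build_type_checking_imports : Prop := ∀ (symbol_map : List (String × String)) (package_base : String), Dom_build_type_checking_imports symbol_map package_base → Spec_build_type_checking_imports symbol_map package_base (build_type_checking_imports symbol_map package_base)

-- ===== LEMMAS AND PROOFS =====

-- A's emission body for one module (zeta-reduced) equals B's pure helper _emit.
lemma pvEmit_eq (module : String) (symbols : List String) (lines : List String) :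
    (if symbols.length == 1 then
        if PySem.Str.len ("    from " ++ module ++ " import " ++ PySem.List.pyGetD symbols 0 "") ≤ 88 then
          lines ++ ["    from " ++ module ++ " import " ++ PySem.List.pyGetD symbols 0 ""]
        else
          lines ++ ["    from " ++ module ++ " import ("]
                ++ ["        " ++ PySem.List.pyGetD symbols 0 "" ++ ","] ++ ["    )"]
      else
        (symbols.foldl (fun l s => l ++ ["        " ++ s ++ ","])
          (lines ++ ["    from " ++ module ++ " import ("])) ++ ["    )"])
    = lines ++ pvEmitGroup module symbols := by
  match symbols with
  | [] =>
      simp [pvEmitGroup]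
  | [s] =>
      simp [pvEmitGroup]
      split_ifs <;> simp
  | s :: t :: r =>
      rw [PySem.List.foldl_append_singleton_eq_map]
      simp [pvEmitGroup]

-- A's grouping dict: its keys and its per-module lists, in terms of the (module, symbol) pair list.
lemma pvKeys_eq (items : List (String × String)) (pb : String) :
    (items.foldl (fun d p => d.modify (pb ++ p.2) [] (fun old => old ++ [p.1])) PySem.Dict.empty).keys
    = PySem.Set.ofList ((items.map (fun p => (pb ++ p.2, p.1))).map (fun q => q.1)) := by
  refine (PySem.Dict.keys_foldl_modify_key items (fun p => pb ++ p.2) [] (fun _ p old => old ++ [p.1]) PySem.Dict.empty).trans ?_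
  simp [List.map_map, Function.comp_def, PySem.Set.update, PySem.Set.ofList_eq_foldl]

lemma pvGetD_eq (items : List (String × String)) (pb : String) (c : String) :
    (items.foldl (fun d p => d.modify (pb ++ p.2) [] (fun old => old ++ [p.1])) PySem.Dict.empty).getD c []
    = (((items.map (fun p => (pb ++ p.2, p.1))).filter (fun q => q.1 == c)).map (fun q => q.2)) := by
  have h : (items.map (fun p => (pb ++ p.2, p.1))).foldl (fun d q => d.modify q.1 [] (fun old => old ++ [q.2])) PySem.Dict.empty
      = items.foldl (fun d p => d.modify (pb ++ p.2) [] (fun old => old ++ [p.1])) PySem.Dict.empty := List.foldl_map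
  rw [← h, PySem.Dict.getD_foldl_modify_append]
  simp

-- ===== VERDICT (by name: the statement is the Claim_ definition above) =====
theorem build_type_checking_imports_spec : Claim_equal_build_type_checking_imports := by
  intro sm pb _
  unfold Spec_build_type_checking_imports build_type_checking_imports build_type_checking_imports_alt
  dsimp only
  refine congrArg (PySem.Str.join "\n") ?_
  rw [pvKeys_eq]
  rw [PySem.List.foldl_congr_mem'
      (g := fun lines module =>
        lines ++ pvEmitGroup module
          (PySem.List.sorted
            (((((PySem.Dict.ofList sm).items.map (fun p => (pb ++ p.2, p.1))).filter (fun q => q.1 == module)).map (fun q => q.2)))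
            (fun s => PySem.Str.lower s) false))
      _ _ _ ?_]
  · rw [PySem.List.foldl_append_eq_flatMap]
    rfl
  · intro module _ lines
    rw [pvGetD_eq]
    exact pvEmit_eq module _ lines
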